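-- pv_equiv track=rewrite | github.com/GavynDracula/dans-sdn | scripts/analyze.py | pkg_modify
-- ===== SOURCE A (Python) =====
-- sig_list = ["-","ubuntu","fedro","opensusu","debian","mandriva","mint","gentoo","centos"]
--
-- def pkg_modify(pkgver):
--     pkg_tab = []
--     pkg_tab = pkgver
--     for sig in sig_list:
--         if sig in pkg_tab:
--             num = pkg_tab.index(sig)
--             pkg_tab =  pkg_tab[:num]
--     if pkg_tab[-1] == '.':
--         pkg_tab = pkg_tab[:-1]
--     return ''.join(pkg_tab)
-- ===== SOURCE B (Python) =====
-- sig_list = ["-","ubuntu","fedro","opensusu","debian","mandriva","mint","gentoo","centos"]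
--
-- def pkg_modify(pkgver):
--     cut = len(pkgver)
--     for sig in sig_list:
--         i = pkgver.find(sig, 0, cut)
--         if i >= 0:
--             cut = i
--     if cut > 0 and pkgver[cut - 1] == '.':
--         cut -= 1
--     return pkgver[:cut]
-- ===== Notes on version B (the rewrite author's own statement) =====
-- stated objective: alternative
-- what changed: B never rebuilds the working string: instead of repeatedly slicing pkg_tab, it keeps pkgver intact and maintains a single integer cut index, using bounded find(sig, 0, cut) per signature and handling the trailing dot arithmetically, slicing once at the end.
import Mathlib
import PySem

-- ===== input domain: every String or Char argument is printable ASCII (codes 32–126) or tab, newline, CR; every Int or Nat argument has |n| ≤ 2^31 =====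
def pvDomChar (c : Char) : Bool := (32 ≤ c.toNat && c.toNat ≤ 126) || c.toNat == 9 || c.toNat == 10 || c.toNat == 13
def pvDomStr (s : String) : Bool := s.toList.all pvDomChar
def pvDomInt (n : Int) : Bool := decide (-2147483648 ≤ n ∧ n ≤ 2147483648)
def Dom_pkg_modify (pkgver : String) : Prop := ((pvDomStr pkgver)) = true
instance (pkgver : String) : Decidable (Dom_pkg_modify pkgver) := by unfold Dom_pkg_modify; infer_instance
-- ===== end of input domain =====

-- B keeps a single integer cut index over the untouched input instead of A's repeated string
-- truncation; same return value wherever A returns (A's in-place pkg_tab rebinding is local, no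
-- observable mutation).

-- ===== PORT A =====
-- module-level constant sig_list (shared by both ports, as in the Python module)
def pvSigList : List (List Char) :=
  ["-".toList, "ubuntu".toList, "fedro".toList, "opensusu".toList, "debian".toList,
   "mandriva".toList, "mint".toList, "gentoo".toList, "centos".toList]

def pkg_modify (pkgver : String) : String :=
  -- pkg_tab = pkgver (a str; ported on its code points)
  let pkg_tab := pkgver.toList
  -- for sig in sig_list: if sig in pkg_tab: num = pkg_tab.index(sig); pkg_tab = pkg_tab[:num]
  let pkg_tab := pvSigList.foldl
    (fun t sig =>
      if PySem.Chars.isIn sig t then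
        let num := PySem.Chars.find t sig  -- .index; equals find since sig in t
        PySem.List.slice t none (some num)
      else t) pkg_tab
  -- if pkg_tab[-1] == '.': pkg_tab = pkg_tab[:-1]   (pkg_tab[-1] raises on empty: outside Pre_)
  let pkg_tab := if PySem.List.pyGet? pkg_tab (-1) = some '.' then
      PySem.List.slice pkg_tab none (some (-1)) else pkg_tab
  -- return ''.join(pkg_tab)
  String.ofList pkg_tab

-- ===== PORT B =====
def pkg_modify_alt (pkgver : String) : String :=
  let cs := pkgver.toList
  -- cut = len(pkgver)
  let cut : Int := cs.length
  -- for sig in sig_list: i = pkgver.find(sig, 0, cut); if i >= 0: cut = i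
  let cut := pvSigList.foldl
    (fun c sig =>
      let i := PySem.Chars.findFrom cs sig 0 (some c)
      if 0 ≤ i then i else c) cut
  -- if cut > 0 and pkgver[cut-1] == '.': cut -= 1
  let cut := if 0 < cut ∧ PySem.List.pyGet? cs (cut - 1) = some '.' then cut - 1 else cut
  -- return pkgver[:cut]
  String.ofList (PySem.List.slice cs none (some cut))

-- ===== PRECONDITION & SPEC =====
-- A raises IndexError (pkg_tab[-1] on the emptied string) exactly on the empty string and on
-- strings that a signature effectively starts: a plain signature prefix, except the two
-- overlapping-signature prefixes ("opensusubuntu…", and "gentoopensusu…" not followed by the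
-- further "…buntu" overlap) where an earlier-processed signature destroys the prefix occurrence
-- first and A still returns. Pre_ excludes exactly the raising inputs.
def PvSigStarts (pkgver : String) : Prop :=
  pkgver.toList = [] ∨
  "-".toList <+: pkgver.toList ∨
  "ubuntu".toList <+: pkgver.toList ∨
  "fedro".toList <+: pkgver.toList ∨
  "debian".toList <+: pkgver.toList ∨
  "mandriva".toList <+: pkgver.toList ∨
  "mint".toList <+: pkgver.toList ∨
  "centos".toList <+: pkgver.toList ∨
  ("opensusu".toList <+: pkgver.toList ∧ ¬ "opensusubuntu".toList <+: pkgver.toList) ∨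
  ("gentoo".toList <+: pkgver.toList ∧
    ("gentoopensusu".toList <+: pkgver.toList → "gentoopensusubuntu".toList <+: pkgver.toList))

def Pre_pkg_modify (pkgver : String) : Prop := ¬ PvSigStarts pkgver

instance (pkgver : String) : Decidable (Pre_pkg_modify pkgver) := by
  unfold Pre_pkg_modify PvSigStarts; infer_instance

def pvWitness_pkg_modify : String := "openssl-1.0.2g"

def Spec_pkg_modify (pkgver : String) (out : String) : Prop := out = pkg_modify_alt pkgver
instance (pkgver : String) (out : String) : Decidable (Spec_pkg_modify pkgver out) := by unfold Spec_pkg_modify; infer_instance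

-- ===== CLAIM (what is proved, stated in full; the proofs are below) =====
def Claim_equal_pkg_modify : Prop := ∀ (pkgver : String), Dom_pkg_modify pkgver → Pre_pkg_modify pkgver → Spec_pkg_modify pkgver (pkg_modify pkgver)

-- ===== LEMMAS AND PROOFS =====

-- One loop step: if the A-side working string is the cut-prefix of cs, it stays the cut-prefix
-- of cs for B's updated cut, and the cut stays within [0, cs.length].
lemma pv_step (cs sig : List Char) (c : Int) (h0 : 0 ≤ c) (hle : c ≤ (cs.length : Int)) :
    (if PySem.Chars.isIn sig (cs.take c.toNat) then
        PySem.List.slice (cs.take c.toNat) none (some (PySem.Chars.find (cs.take c.toNat) sig))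
      else cs.take c.toNat)
      = cs.take ((if 0 ≤ PySem.Chars.findFrom cs sig 0 (some c) then
                    PySem.Chars.findFrom cs sig 0 (some c) else c).toNat)
    ∧ 0 ≤ (if 0 ≤ PySem.Chars.findFrom cs sig 0 (some c) then
            PySem.Chars.findFrom cs sig 0 (some c) else c)
    ∧ (if 0 ≤ PySem.Chars.findFrom cs sig 0 (some c) then
        PySem.Chars.findFrom cs sig 0 (some c) else c) ≤ (cs.length : Int) := by
  have hFF : PySem.Chars.findFrom cs sig 0 (some c)
      = (if PySem.Chars.find (cs.take c.toNat) sig = -1 then -1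
         else PySem.Chars.find (cs.take c.toNat) sig) := by
    simp only [PySem.Chars.findFrom]
    rw [if_neg (not_lt.mpr hle), if_neg (by omega : ¬ c < 0), if_neg (by omega : ¬ (0:Int) < 0),
        if_neg (not_lt.mpr h0)]
    simp
  have hlen : (cs.take c.toNat).length = c.toNat := by
    simp [List.length_take]; omega
  by_cases hin : PySem.Chars.isIn sig (cs.take c.toNat) = true
  · have hinf := (PySem.Chars.isIn_iff_infix sig (cs.take c.toNat)).mp hin
    have hne : PySem.Chars.find (cs.take c.toNat) sig ≠ -1 :=
      (PySem.Chars.find_ne_neg_one_iff _ _).mpr hinf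
    have hpos : 0 ≤ PySem.Chars.find (cs.take c.toNat) sig := by
      have := PySem.Chars.neg_one_le_find (cs.take c.toNat) sig; omega
    have hFle : PySem.Chars.find (cs.take c.toNat) sig ≤ (c.toNat : Int) := by
      have := PySem.Chars.find_le_length (cs.take c.toNat) sig
      rwa [hlen] at this
    rw [hFF, if_neg hne, if_pos hpos]
    refine ⟨?_, hpos, by omega⟩
    rw [if_pos hin, PySem.List.slice_to _ hpos, List.take_take]
    congr 1
    omega
  · have hninf : ¬ sig <:+: (cs.take c.toNat) := by
      intro h; exact hin ((PySem.Chars.isIn_iff_infix sig (cs.take c.toNat)).mpr h)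
    have heq : PySem.Chars.find (cs.take c.toNat) sig = -1 :=
      (PySem.Chars.find_eq_neg_one_iff _ _).mpr hninf
    rw [hFF, if_pos heq, if_neg (by omega : ¬ (0:Int) ≤ -1), if_neg hin]
    exact ⟨rfl, h0, hle⟩

-- The whole loop: folding A's truncation step from the cut-prefix equals taking the cut B folds to.
lemma pv_fold (sigs : List (List Char)) (cs : List Char) :
    ∀ c : Int, 0 ≤ c → c ≤ (cs.length : Int) →
    sigs.foldl (fun t sig =>
        if PySem.Chars.isIn sig t then
          PySem.List.slice t none (some (PySem.Chars.find t sig))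
        else t) (cs.take c.toNat)
      = cs.take ((sigs.foldl (fun c sig =>
          if 0 ≤ PySem.Chars.findFrom cs sig 0 (some c) then
            PySem.Chars.findFrom cs sig 0 (some c) else c) c).toNat)
    ∧ 0 ≤ sigs.foldl (fun c sig =>
          if 0 ≤ PySem.Chars.findFrom cs sig 0 (some c) then
            PySem.Chars.findFrom cs sig 0 (some c) else c) c
    ∧ sigs.foldl (fun c sig =>
          if 0 ≤ PySem.Chars.findFrom cs sig 0 (some c) then
            PySem.Chars.findFrom cs sig 0 (some c) else c) c ≤ (cs.length : Int) := by
  induction sigs with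
  | nil => intro c h0 hle; exact ⟨rfl, h0, hle⟩
  | cons sig rest ih =>
    intro c h0 hle
    obtain ⟨hs, hs0, hsle⟩ := pv_step cs sig c h0 hle
    simp only [List.foldl_cons]
    rw [hs]
    exact ih _ hs0 hsle

-- pyGet? at -1 on a nonempty take-prefix reads the char before the cut.
lemma pv_last (cs : List Char) (c : Int) (h0 : 0 ≤ c) (hle : c ≤ (cs.length : Int)) :
    (PySem.List.pyGet? (cs.take c.toNat) (-1) = some '.') ↔
    (0 < c ∧ PySem.List.pyGet? cs (c - 1) = some '.') := by
  have hlen : (cs.take c.toNat).length = c.toNat := by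
    simp [List.length_take]; omega
  rw [PySem.List.pyGet?_neg_one]
  by_cases hc : 0 < c
  · rw [List.getLast?_eq_getElem?, hlen,
        PySem.List.pyGet?_of_nonneg cs (by omega : (0:Int) ≤ c - 1),
        show (c - 1).toNat = c.toNat - 1 from by omega,
        List.getElem?_take_of_lt (by omega : c.toNat - 1 < c.toNat)]
    simp [hc]
  · have hc0 : c = 0 := by omega
    subst hc0
    simp

-- The trailing-dot step and the final slice agree once both sides sit on the same cut.
lemma pv_final (cs : List Char) (k : Int) (h0 : 0 ≤ k) (hle : k ≤ (cs.length : Int)) :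
    String.ofList (if PySem.List.pyGet? (cs.take k.toNat) (-1) = some '.' then
        PySem.List.slice (cs.take k.toNat) none (some (-1)) else cs.take k.toNat)
      = String.ofList (PySem.List.slice cs none
          (some (if 0 < k ∧ PySem.List.pyGet? cs (k - 1) = some '.' then k - 1 else k))) := by
  have hcond := pv_last cs k h0 hle
  by_cases h : PySem.List.pyGet? (cs.take k.toNat) (-1) = some '.'
  · obtain ⟨hk, hdot⟩ := hcond.mp h
    rw [if_pos h, if_pos ⟨hk, hdot⟩]
    congr 1
    rw [PySem.List.slice_to_neg_one,
        PySem.List.slice_to _ (by omega : (0:Int) ≤ k - 1),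
        List.dropLast_eq_take, List.length_take, List.take_take]
    congr 1
    omega
  · rw [if_neg h, if_neg (fun hh => h (hcond.mpr hh))]
    congr 1
    rw [PySem.List.slice_to _ h0]

theorem pv_ports_eq (pkgver : String) : pkg_modify pkgver = pkg_modify_alt pkgver := by
  simp only [pkg_modify, pkg_modify_alt]
  have hlen0 : (0:Int) ≤ (pkgver.toList.length : Int) := by positivity
  obtain ⟨hfold, hk0, hkle⟩ :=
    pv_fold pvSigList pkgver.toList ((pkgver.toList.length : Int)) hlen0 le_rfl
  rw [show ((pkgver.toList.length : Int)).toNat = pkgver.toList.length from by omega,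
      List.take_length] at hfold
  rw [hfold]
  exact pv_final pkgver.toList _ hk0 hkle

-- ===== VERDICT (by name: the statement is the Claim_ definition above) =====
theorem pkg_modify_spec : Claim_equal_pkg_modify := by
  intro pkgver _ _
  unfold Spec_pkg_modify
  exact pv_ports_eq pkgver
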